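-- pv_equiv track=rewrite | github.com/salocinrevenge/Criptografia | esteganografia.py | lerPalavra
-- ===== SOURCE A (Python) =====
-- def change(numero, bits):
--     temp = 0
--     for i in range(bits):
--         temp = temp << 1
--         temp |= numero & 1
--         numero = numero >> 1
--     return temp
--
-- def lerPalavra(vetor, tamanho, pos, reversed):
--     palavra = ""
--     for _ in range(tamanho):
--         letra = 0
--         for _ in range(16):
--             letra = letra << 1
--             if (vetor[pos] & 1) == 1:
--                 letra |= 1
--             pos += 1
--             if reversed:
--                 pos -=2
--         palavra += chr(change(letra,16))
--     return palavra, pos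
-- ===== SOURCE B (Python) =====
-- def lerPalavra(vetor, tamanho, pos, reversed):
--     passo = -1 if reversed else 1
--     letras = []
--     for _ in range(tamanho):
--         letra = 0
--         for j in range(16):
--             letra += (vetor[pos] & 1) * 2 ** j
--             pos += passo
--         letras.append(chr(letra))
--     return "".join(letras), pos
-- ===== Notes on version B (the rewrite author's own statement) =====
-- stated objective: simpler
-- what changed: Each character is assembled in one direct pass as a LSB-first weighted sum letra += (vetor[pos]&1)*2**j, eliminating A's two-pass build-MSB-first-then-call-change(letra,16) bit reversal and its helper entirely; characters are collected in a list and joined once.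
import Mathlib
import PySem

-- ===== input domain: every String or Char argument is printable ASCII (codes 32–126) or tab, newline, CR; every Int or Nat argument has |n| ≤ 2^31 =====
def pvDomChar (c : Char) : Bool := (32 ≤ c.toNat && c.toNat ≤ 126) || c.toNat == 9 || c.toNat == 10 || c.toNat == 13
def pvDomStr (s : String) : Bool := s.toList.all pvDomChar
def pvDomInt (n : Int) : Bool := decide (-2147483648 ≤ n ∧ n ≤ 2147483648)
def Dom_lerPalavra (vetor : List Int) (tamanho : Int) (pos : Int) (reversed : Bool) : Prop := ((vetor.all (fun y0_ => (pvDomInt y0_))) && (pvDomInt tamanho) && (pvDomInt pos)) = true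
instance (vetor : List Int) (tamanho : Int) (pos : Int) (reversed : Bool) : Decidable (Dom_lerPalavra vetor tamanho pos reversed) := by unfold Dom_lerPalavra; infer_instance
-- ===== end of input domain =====

-- B replaces A's build-MSB-first-then-bit-reverse two-pass character assembly (helper `change`)
-- by one direct LSB-first weighted sum per character (objective: simpler; return value only —
-- neither version mutates its arguments).
-- Python strings are modelled as List Char during the loops and packed with String.ofList at the end
-- (Lean's own String.append is opaque to the kernel); chr(n) is ported as Char.ofNat n, exact for
-- every non-surrogate code point below 0x110000 — Pre_ excludes surrogate results.

-- ===== PORT A =====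
-- helper change(numero, bits): reverse the low `bits` bits of numero
def pvChange (numero : Int) (bits : Int) : Int :=
  ((PySem.List.pyRange 0 bits 1).foldl
    (fun (st : Int × Int) _ =>
      (PySem.Int.bor (st.1 <<< (1 : Nat)) (PySem.Int.band st.2 1), st.2 >>> (1 : Nat)))
    (0, numero)).1

def lerPalavra (vetor : List Int) (tamanho : Int) (pos : Int) (reversed : Bool) : String × Int :=
  let st := (PySem.List.pyRange 0 tamanho 1).foldl
    (fun (st : List Char × Int) _ =>
      let q := (PySem.List.pyRange 0 16 1).foldl
        (fun (q : Int × Int) _ =>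
          let letra := q.1 <<< (1 : Nat)
          let letra := if PySem.Int.band (PySem.List.pyGetD vetor q.2 0) 1 == 1 then PySem.Int.bor letra 1 else letra
          let p := q.2 + 1
          let p := if reversed then p - 2 else p
          (letra, p))
        ((0 : Int), st.2)
      (st.1 ++ [Char.ofNat (pvChange q.1 16).toNat], q.2))
    (([] : List Char), pos)
  (String.ofList st.1, st.2)

-- ===== PORT B =====
def lerPalavra_alt (vetor : List Int) (tamanho : Int) (pos : Int) (reversed : Bool) : String × Int :=
  let passo : Int := if reversed then -1 else 1
  let st := (PySem.List.pyRange 0 tamanho 1).foldl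
    (fun (st : List Char × Int) _ =>
      let q := (List.range 16).foldl
        (fun (q : Int × Int) j =>
          (q.1 + PySem.Int.band (PySem.List.pyGetD vetor q.2 0) 1 * 2 ^ j, q.2 + passo))
        ((0 : Int), st.2)
      (st.1 ++ [Char.ofNat q.1.toNat], q.2))
    (([] : List Char), pos)
  (String.ofList st.1, st.2)

-- ===== PRECONDITION & SPEC =====
-- the (j+1)-th bit value read starting at index p (Python: vetor[p] & 1)
def pvBit (vetor : List Int) (p : Int) : Int :=
  PySem.Int.band (PySem.List.pyGetD vetor p 0) 1

-- the 16-bit code point assembled from the reads starting at p0 with step passo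
def pvLb (vetor : List Int) (p0 passo : Int) : Nat → Int
  | 0 => 0
  | n + 1 => pvLb vetor p0 passo n + pvBit vetor (p0 + n * passo) * 2 ^ n

-- Pre_ excludes (a) out-of-range reads, on which A raises IndexError, and (b) inputs whose
-- assembled 16-bit code point lies in the UTF-16 surrogate range 0xD800–0xDFFF: there A (and B)
-- return a Python str holding a lone surrogate, which is not representable as a Lean Char/String.
def Pre_lerPalavra (vetor : List Int) (tamanho : Int) (pos : Int) (reversed : Bool) : Prop :=
  (tamanho ≤ 0 ∨
    (-(vetor.length : Int) ≤ (if reversed then pos - (16 * tamanho - 1) else pos) ∧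
     (if reversed then pos else pos + (16 * tamanho - 1)) < (vetor.length : Int))) ∧
  (∀ k : Nat, k < tamanho.toNat →
    ¬ (55296 ≤ pvLb vetor (pos + 16 * k * (if reversed then -1 else 1)) (if reversed then -1 else 1) 16 ∧
       pvLb vetor (pos + 16 * k * (if reversed then -1 else 1)) (if reversed then -1 else 1) 16 < 57344))
instance (vetor : List Int) (tamanho : Int) (pos : Int) (reversed : Bool) : Decidable (Pre_lerPalavra vetor tamanho pos reversed) := by unfold Pre_lerPalavra; infer_instance

def pvWitness_lerPalavra : List Int × Int × Int × Bool := ([0,0,0,0,0,0,0,0,0,0,0,0,0,0,0,0], 1, 0, false)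

def Spec_lerPalavra (vetor : List Int) (tamanho : Int) (pos : Int) (reversed : Bool) (out : String × Int) : Prop := out = lerPalavra_alt vetor tamanho pos reversed
instance (vetor : List Int) (tamanho : Int) (pos : Int) (reversed : Bool) (out : String × Int) : Decidable (Spec_lerPalavra vetor tamanho pos reversed out) := by unfold Spec_lerPalavra; infer_instance

-- ===== CLAIM (what is proved, stated in full; the proofs are below) =====
def Claim_equal_lerPalavra : Prop := ∀ (vetor : List Int) (tamanho : Int) (pos : Int) (reversed : Bool), Dom_lerPalavra vetor tamanho pos reversed → Pre_lerPalavra vetor tamanho pos reversed → Spec_lerPalavra vetor tamanho pos reversed (lerPalavra vetor tamanho pos reversed)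

-- ===== LEMMAS AND PROOFS =====

def pvPasso (reversed : Bool) : Int := if reversed then -1 else 1

-- A's inner loop builds the character MSB-first
def pvLa (vetor : List Int) (p0 passo : Int) : Nat → Int
  | 0 => 0
  | n + 1 => 2 * pvLa vetor p0 passo n + pvBit vetor (p0 + n * passo)

-- state of `change`'s accumulator after k of n steps
def pvR (vetor : List Int) (p0 passo : Int) (n : Nat) : Nat → Int
  | 0 => 0
  | k + 1 => 2 * pvR vetor p0 passo n k + pvBit vetor (p0 + (n - 1 - k : Nat) * passo)

lemma pvBit01 (vetor : List Int) (p : Int) : pvBit vetor p = 0 ∨ pvBit vetor p = 1 := by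
  unfold pvBit
  rw [PySem.Int.band_one]
  have h1 := PySem.Int.mod_nonneg (PySem.List.pyGetD vetor p 0) (b := 2) (by omega)
  have h2 := PySem.Int.mod_lt (PySem.List.pyGetD vetor p 0) (b := 2) (by omega)
  omega

lemma pvLa_nonneg (vetor : List Int) (p0 passo : Int) (n : Nat) : 0 ≤ pvLa vetor p0 passo n := by
  induction n with
  | zero => simp [pvLa]
  | succ n ih =>
    rcases pvBit01 vetor (p0 + n * passo) with h | h <;> simp [pvLa, h] <;> omega

lemma pvR_nonneg (vetor : List Int) (p0 passo : Int) (n k : Nat) : 0 ≤ pvR vetor p0 passo n k := by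
  induction k with
  | zero => simp [pvR]
  | succ k ih =>
    rcases pvBit01 vetor (p0 + (n - 1 - k : Nat) * passo) with h | h <;> simp [pvR, h] <;> omega

lemma pvShl1 (a : Int) : a <<< (1 : Nat) = 2 * a := by
  simp [Int.shiftLeft_eq]; ring

lemma pvOrTwoMulOne (m : Nat) : (2 * m) ||| 1 = 2 * m + 1 := by
  have h1 : (2 * m ||| 1) / 2 = (2 * m) / 2 ||| 1 / 2 := Nat.or_div_two
  have h0 : (2 * m ||| 1) % 2 = 1 := by simp [Nat.or_mod_two_eq_one]
  simp at h1
  omega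

lemma pvBor1 (a : Int) (h : 0 ≤ a) : PySem.Int.bor (2 * a) 1 = 2 * a + 1 := by
  rw [PySem.Int.bor_of_nonneg (by omega) (by omega)]
  have h2 : (2 * a).toNat = 2 * a.toNat := by omega
  have h3 : (1 : Int).toNat = 1 := rfl
  rw [h2, h3, pvOrTwoMulOne]
  omega

lemma pvBand1 (a u : Int) (_ha : 0 ≤ a) (hu : u = 0 ∨ u = 1) :
    PySem.Int.band (2 * a + u) 1 = u := by
  rw [PySem.Int.band_one, PySem.Int.mod_eq_emod_of_pos (by omega)]
  omega

lemma pvShr1 (a u : Int) (_ha : 0 ≤ a) (hu : u = 0 ∨ u = 1) :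
    (2 * a + u) >>> (1 : Nat) = a := by
  rw [Int.shiftRight_eq_div_pow]
  push_cast
  omega

lemma pvInnerA (vetor : List Int) (reversed : Bool) (n : Nat) (p0 : Int) :
    (PySem.List.pyRange 0 (n : Int) 1).foldl
      (fun (q : Int × Int) _ =>
        let letra := q.1 <<< (1 : Nat)
        let letra := if PySem.Int.band (PySem.List.pyGetD vetor q.2 0) 1 == 1 then PySem.Int.bor letra 1 else letra
        let p := q.2 + 1
        let p := if reversed then p - 2 else p
        (letra, p))
      ((0 : Int), p0)
    = (pvLa vetor p0 (pvPasso reversed) n, p0 + n * pvPasso reversed) := by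
  induction n with
  | zero => simp [PySem.List.pyRange_one_eq_nil, pvLa]
  | succ n ih =>
    rw [show ((n + 1 : Nat) : Int) = ((n : Int) + 1) by push_cast; ring]
    rw [PySem.List.pyRange_one_succ_right (by exact_mod_cast Nat.zero_le n)]
    rw [List.foldl_append, ih]
    simp only [List.foldl_cons, List.foldl_nil]
    have hb := pvBit01 vetor (p0 + n * pvPasso reversed)
    have hL := pvLa_nonneg vetor p0 (pvPasso reversed) n
    rw [Prod.mk.injEq]
    constructor
    · show (if PySem.Int.band (PySem.List.pyGetD vetor (p0 + n * pvPasso reversed) 0) 1 == 1 then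
          PySem.Int.bor (pvLa vetor p0 (pvPasso reversed) n <<< (1 : Nat)) 1
        else pvLa vetor p0 (pvPasso reversed) n <<< (1 : Nat)) = pvLa vetor p0 (pvPasso reversed) (n + 1)
      rw [pvShl1]
      simp only [pvLa]
      simp only [pvBit] at hb
      unfold pvBit
      rcases hb with h | h <;> rw [h]
      · norm_num
      · norm_num [pvBor1 _ hL]
    · show (if reversed then p0 + n * pvPasso reversed + 1 - 2 else p0 + n * pvPasso reversed + 1)
        = p0 + (n + 1 : Nat) * pvPasso reversed
      cases reversed <;> simp [pvPasso] <;> push_cast <;> ring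

lemma pvInnerB (vetor : List Int) (passo : Int) (n : Nat) (p0 : Int) :
    (List.range n).foldl
      (fun (q : Int × Int) j =>
        (q.1 + PySem.Int.band (PySem.List.pyGetD vetor q.2 0) 1 * 2 ^ j, q.2 + passo))
      ((0 : Int), p0)
    = (pvLb vetor p0 passo n, p0 + n * passo) := by
  induction n with
  | zero => simp [pvLb]
  | succ n ih =>
    rw [List.range_succ, List.foldl_append, ih]
    simp only [List.foldl_cons, List.foldl_nil, pvLb]
    rw [Prod.mk.injEq]
    constructor
    · show pvLb vetor p0 passo n + PySem.Int.band (PySem.List.pyGetD vetor (p0 + n * passo) 0) 1 * 2 ^ n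
        = pvLb vetor p0 passo n + pvBit vetor (p0 + n * passo) * 2 ^ n
      rfl
    · push_cast; ring

lemma pvChangeFold (vetor : List Int) (p0 passo : Int) (n k : Nat) (hk : k ≤ n) :
    (PySem.List.pyRange 0 (k : Int) 1).foldl
      (fun (st : Int × Int) _ =>
        (PySem.Int.bor (st.1 <<< (1 : Nat)) (PySem.Int.band st.2 1), st.2 >>> (1 : Nat)))
      (0, pvLa vetor p0 passo n)
    = (pvR vetor p0 passo n k, pvLa vetor p0 passo (n - k)) := by
  induction k with
  | zero => simp [pvR]
  | succ k ih =>
    rw [show ((k + 1 : Nat) : Int) = ((k : Int) + 1) by push_cast; ring]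
    rw [PySem.List.pyRange_one_succ_right (by exact_mod_cast Nat.zero_le k)]
    rw [List.foldl_append, ih (by omega)]
    simp only [List.foldl_cons, List.foldl_nil]
    have hnk : n - k = (n - k - 1) + 1 := by omega
    have hidx : n - 1 - k = n - k - 1 := by omega
    have hb := pvBit01 vetor (p0 + (n - k - 1 : Nat) * passo)
    have hL := pvLa_nonneg vetor p0 passo (n - k - 1)
    have hR := pvR_nonneg vetor p0 passo n k
    rw [hnk]
    show (PySem.Int.bor (pvR vetor p0 passo n k <<< (1 : Nat))
        (PySem.Int.band (pvLa vetor p0 passo ((n - k - 1) + 1)) 1),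
        pvLa vetor p0 passo ((n - k - 1) + 1) >>> (1 : Nat))
      = (pvR vetor p0 passo n (k + 1), pvLa vetor p0 passo (n - k - 1))
    simp only [pvLa]
    rw [pvBand1 _ _ hL hb, pvShr1 _ _ hL hb, pvShl1]
    simp only [pvR, hidx]
    rcases hb with h | h <;> rw [h]
    · simp
    · rw [pvBor1 _ hR]

lemma pvRshift (vetor : List Int) (p0 passo : Int) (n k : Nat) :
    pvR vetor p0 passo (n + 1) (k + 1)
    = 2 ^ k * pvBit vetor (p0 + n * passo) + pvR vetor p0 passo n k := by
  induction k with
  | zero => simp [pvR]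
  | succ k ih =>
    have hidx : n + 1 - 1 - (k + 1) = n - 1 - k := by omega
    calc pvR vetor p0 passo (n + 1) (k + 2)
        = 2 * pvR vetor p0 passo (n + 1) (k + 1)
          + pvBit vetor (p0 + (n + 1 - 1 - (k + 1) : Nat) * passo) := rfl
      _ = 2 * (2 ^ k * pvBit vetor (p0 + n * passo) + pvR vetor p0 passo n k)
          + pvBit vetor (p0 + (n - 1 - k : Nat) * passo) := by rw [ih, hidx]
      _ = 2 ^ (k + 1) * pvBit vetor (p0 + n * passo) + pvR vetor p0 passo n (k + 1) := by
          simp only [pvR]; ring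

lemma pvRnn (vetor : List Int) (p0 passo : Int) (n : Nat) :
    pvR vetor p0 passo n n = pvLb vetor p0 passo n := by
  induction n with
  | zero => simp [pvR, pvLb]
  | succ n ih =>
    rw [pvRshift, ih]
    simp only [pvLb]
    ring

lemma pvChangeEq (vetor : List Int) (p0 passo : Int) :
    pvChange (pvLa vetor p0 passo 16) 16 = pvLb vetor p0 passo 16 := by
  unfold pvChange
  rw [show (16 : Int) = ((16 : Nat) : Int) by norm_num]
  rw [pvChangeFold vetor p0 passo 16 16 (by omega)]
  exact pvRnn vetor p0 passo 16

lemma pvPortsEq (vetor : List Int) (tamanho : Int) (pos : Int) (reversed : Bool) :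
    lerPalavra vetor tamanho pos reversed = lerPalavra_alt vetor tamanho pos reversed := by
  unfold lerPalavra lerPalavra_alt
  simp only []
  suffices h : ∀ (l : List Int) (cs : List Char) (p : Int),
      l.foldl
        (fun (st : List Char × Int) _ =>
          let q := (PySem.List.pyRange 0 16 1).foldl
            (fun (q : Int × Int) _ =>
              let letra := q.1 <<< (1 : Nat)
              let letra := if PySem.Int.band (PySem.List.pyGetD vetor q.2 0) 1 == 1 then PySem.Int.bor letra 1 else letra
              let p := q.2 + 1
              let p := if reversed then p - 2 else p
              (letra, p))
            ((0 : Int), st.2)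
          (st.1 ++ [Char.ofNat (pvChange q.1 16).toNat], q.2))
        (cs, p)
      = l.foldl
        (fun (st : List Char × Int) _ =>
          let q := (List.range 16).foldl
            (fun (q : Int × Int) j =>
              (q.1 + PySem.Int.band (PySem.List.pyGetD vetor q.2 0) 1 * 2 ^ j, q.2 + (if reversed then -1 else 1)))
            ((0 : Int), st.2)
          (st.1 ++ [Char.ofNat q.1.toNat], q.2))
        (cs, p) by
    rw [h (PySem.List.pyRange 0 tamanho 1) [] pos]
  intro l
  induction l with
  | nil => intro cs p; rfl
  | cons x l ih =>
    intro cs p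
    simp only [List.foldl_cons]
    have hA : (PySem.List.pyRange 0 16 1).foldl
        (fun (q : Int × Int) _ =>
          let letra := q.1 <<< (1 : Nat)
          let letra := if PySem.Int.band (PySem.List.pyGetD vetor q.2 0) 1 == 1 then PySem.Int.bor letra 1 else letra
          let p := q.2 + 1
          let p := if reversed then p - 2 else p
          (letra, p))
        ((0 : Int), p)
      = (pvLa vetor p (pvPasso reversed) 16, p + 16 * pvPasso reversed) := by
      rw [show (16 : Int) = ((16 : Nat) : Int) by norm_num]
      rw [pvInnerA vetor reversed 16 p]
    have hB : (List.range 16).foldl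
        (fun (q : Int × Int) j =>
          (q.1 + PySem.Int.band (PySem.List.pyGetD vetor q.2 0) 1 * 2 ^ j, q.2 + (if reversed then -1 else 1)))
        ((0 : Int), p)
      = (pvLb vetor p (pvPasso reversed) 16, p + 16 * pvPasso reversed) := by
      rw [pvInnerB vetor (if reversed then -1 else 1) 16 p]
      norm_num [pvPasso]
    rw [hA, hB, pvChangeEq]
    exact ih _ _

-- ===== VERDICT (by name: the statement is the Claim_ definition above) =====
theorem lerPalavra_spec : Claim_equal_lerPalavra := by
  intro vetor tamanho pos reversed _ _
  unfold Spec_lerPalavra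
  exact pvPortsEq vetor tamanho pos reversed
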